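-- pv_equiv track=rewrite | github.com/msproteomicstools/msproteomicstools | msproteomicstoolslib/format/ProteinDB.py | removeModifications
-- ===== SOURCE A (Python) =====
-- def removeModifications(peptides) :
--     peptide_output = []
--     for peptide in peptides :
--         while peptide.find('[') > -1 :
--             left_bracket  = peptide.find('[')
--             right_bracket = peptide.find(']')
--             peptide_tmp = peptide[:left_bracket] + peptide[right_bracket+1:]
--             peptide = peptide_tmp
--         peptide_output.append(peptide)
--
--     return peptide_output
-- ===== SOURCE B (Python) =====
-- def removeModifications(peptides):
--     peptide_output = []
--     for peptide in peptides:
--         chars = []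
--         in_bracket = False
--         for ch in peptide:
--             if in_bracket:
--                 if ch == ']':
--                     in_bracket = False
--             elif ch == '[':
--                 in_bracket = True
--             else:
--                 chars.append(ch)
--         peptide_output.append(''.join(chars))
--     return peptide_output
-- ===== Notes on version B (the rewrite author's own statement) =====
-- stated objective: alternative
-- what changed: Replaced the repeated find-and-splice loop (rescan and rebuild the string once per bracket pair) by a single left-to-right scan per peptide with an in-bracket flag that appends the kept characters.
import Mathlib
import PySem

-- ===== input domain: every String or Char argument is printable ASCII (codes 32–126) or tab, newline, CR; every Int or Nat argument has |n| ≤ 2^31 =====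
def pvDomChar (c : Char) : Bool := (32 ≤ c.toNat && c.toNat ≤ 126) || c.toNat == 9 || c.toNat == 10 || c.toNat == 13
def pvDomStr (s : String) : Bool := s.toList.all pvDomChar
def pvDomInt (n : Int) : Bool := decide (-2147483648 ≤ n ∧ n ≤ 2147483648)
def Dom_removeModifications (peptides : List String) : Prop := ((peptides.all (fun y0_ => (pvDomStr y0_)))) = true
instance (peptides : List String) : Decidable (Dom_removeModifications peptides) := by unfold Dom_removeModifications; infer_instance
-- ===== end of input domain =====

-- B replaces A's repeated find-and-splice passes by one left-to-right scan per peptide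
-- with an in-bracket flag (objective: alternative single-pass algorithm).

-- ===== PORT A =====
-- Python A's while-loop; the fuel argument only makes the recursion total (under
-- Pre_ the loop runs at most count '[' ≤ length times, so fuel never runs out).
def pvCleanA : Nat → List Char → List Char
  | 0, p => p
  | Nat.succ fuel, p =>
    if PySem.Chars.find p ['['] > -1 then
      let leftBracket := PySem.Chars.find p ['[']
      let rightBracket := PySem.Chars.find p [']']
      pvCleanA fuel (PySem.Chars.slice p none (some leftBracket) ++
                     PySem.Chars.slice p (some (rightBracket + 1)) none)
    else p

def removeModifications (peptides : List String) : List String :=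
  peptides.foldl
    (fun acc peptide => acc ++ [String.ofList (pvCleanA (peptide.toList.length + 1) peptide.toList)])
    []

-- ===== PORT B =====
def pvStepB (st : Bool × List Char) (c : Char) : Bool × List Char :=
  if st.1 then (if c = ']' then (false, st.2) else (true, st.2))
  else if c = '[' then (true, st.2) else (false, st.2 ++ [c])

def removeModifications_alt (peptides : List String) : List String :=
  peptides.foldl
    (fun acc peptide => acc ++ [String.ofList (peptide.toList.foldl pvStepB (false, [])).2])
    []

-- ===== PRECONDITION & SPEC =====
-- Pre_ excludes exactly the peptides on which Python A never returns (infinite loop):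
-- a '[' that is never closed, or a ']' occurring before a later '['.  Equivalently the
-- bracket characters of each peptide must read as zero or more '['…'[' ']' groups
-- followed by optional trailing ']'s; stated as a mutual grammar check on the characters.
mutual
  def pvOk : List Char → Bool
    | [] => true
    | c :: rest => if c = '[' then pvInside rest else if c = ']' then pvTail rest else pvOk rest
  def pvInside : List Char → Bool
    | [] => false
    | c :: rest => if c = ']' then pvOk rest else pvInside rest
  def pvTail : List Char → Bool
    | [] => true
    | c :: rest => if c = '[' then false else pvTail rest
end

def Pre_removeModifications (peptides : List String) : Prop :=
  ∀ s ∈ peptides, pvOk s.toList = true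
instance (peptides : List String) : Decidable (Pre_removeModifications peptides) := by
  unfold Pre_removeModifications; infer_instance

def pvWitness_removeModifications : List String := ["PEP[+80]TIDE", "AC[x[y]z]K", "SEQ"]

def Spec_removeModifications (peptides : List String) (out : List String) : Prop := out = removeModifications_alt peptides
instance (peptides : List String) (out : List String) : Decidable (Spec_removeModifications peptides out) := by unfold Spec_removeModifications; infer_instance

-- ===== CLAIM (what is proved, stated in full; the proofs are below) =====
def Claim_equal_removeModifications : Prop := ∀ (peptides : List String), Dom_removeModifications peptides → Pre_removeModifications peptides → Spec_removeModifications peptides (removeModifications peptides)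

-- ===== LEMMAS AND PROOFS =====

-- proof-side recursive form of B's scan
def pvScan : Bool → List Char → List Char
  | _, [] => []
  | true, c :: rest => if c = ']' then pvScan false rest else pvScan true rest
  | false, c :: rest => if c = '[' then pvScan true rest else c :: pvScan false rest

theorem pvFoldB (l : List Char) : ∀ (flag : Bool) (acc : List Char),
    (l.foldl pvStepB (flag, acc)).2 = acc ++ pvScan flag l := by
  induction l with
  | nil => intro flag acc; simp [pvScan]
  | cons c rest ih =>
    intro flag acc
    cases flag
    · by_cases h : c = '[' <;> simp [List.foldl, pvStepB, pvScan, h, ih]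
    · by_cases h : c = ']' <;> simp [List.foldl, pvStepB, pvScan, h, ih]

theorem pvScan_no_bracket (l : List Char) (h : '[' ∉ l) : pvScan false l = l := by
  induction l with
  | nil => rfl
  | cons c rest ih =>
    simp only [List.mem_cons, not_or] at h
    simp [pvScan, Ne.symm h.1, ih h.2]

theorem pvScan_false_append (pre l : List Char) (h : '[' ∉ pre) :
    pvScan false (pre ++ l) = pre ++ pvScan false l := by
  induction pre with
  | nil => rfl
  | cons c rest ih =>
    simp only [List.mem_cons, not_or] at h
    simp [pvScan, Ne.symm h.1, ih h.2]

theorem pvScan_true_append (mid l : List Char) (h : ']' ∉ mid) :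
    pvScan true (mid ++ l) = pvScan true l := by
  induction mid with
  | nil => rfl
  | cons c rest ih =>
    simp only [List.mem_cons, not_or] at h
    simp [pvScan, Ne.symm h.1, ih h.2]

theorem pvOk_append (pre l : List Char) (h1 : '[' ∉ pre) (h2 : ']' ∉ pre) :
    pvOk (pre ++ l) = pvOk l := by
  induction pre with
  | nil => rfl
  | cons c rest ih =>
    simp only [List.mem_cons, not_or] at h1 h2
    simp [pvOk, Ne.symm h1.1, Ne.symm h2.1, ih h1.2 h2.2]

theorem pvInfix_singleton {c : Char} {l : List Char} : [c] <:+: l ↔ c ∈ l := by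
  constructor
  · rintro ⟨s, t, rfl⟩; simp
  · intro h
    obtain ⟨s, t, rfl⟩ := List.append_of_mem h
    exact ⟨s, t, by simp⟩

-- first occurrence of a single character: the exact index
theorem pvFind_char (pre rest : List Char) (c : Char) (h : c ∉ pre) :
    PySem.Chars.find (pre ++ c :: rest) [c] = (pre.length : Int) := by
  have hin : [c] <:+: (pre ++ c :: rest) := pvInfix_singleton.mpr (by simp)
  have hnn : 0 ≤ PySem.Chars.find (pre ++ c :: rest) [c] :=
    (PySem.Chars.find_nonneg_iff _ _).mpr hin
  obtain ⟨hpref, hmin⟩ := PySem.Chars.find_spec (s := pre ++ c :: rest) (sub := [c]) hnn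
  set f := PySem.Chars.find (pre ++ c :: rest) [c] with hf
  have hle : f.toNat ≤ pre.length := by
    by_contra hgt
    exact hmin pre.length (by omega) (by simp)
  rcases Nat.lt_or_ge f.toNat pre.length with hlt | hge
  · exfalso
    have hdrop : (pre ++ c :: rest).drop f.toNat = pre.drop f.toNat ++ c :: rest :=
      List.drop_append_of_le_length (by omega)
    obtain ⟨d, ds, hds⟩ := List.exists_cons_of_ne_nil
      (show pre.drop f.toNat ≠ [] by
        intro hnil; have := List.drop_eq_nil_iff.mp hnil; omega)
    rw [hdrop, hds] at hpref
    have hd : c = d := (List.cons_prefix_cons.mp hpref).1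
    have hdmem : d ∈ pre := List.mem_of_mem_drop (hds ▸ List.mem_cons_self ..)
    exact h (hd ▸ hdmem)
  · omega

theorem pvTail_no_open : ∀ (l : List Char), pvTail l = true → '[' ∉ l := by
  intro l
  induction l with
  | nil => simp
  | cons c rest ih =>
    intro ht
    rw [pvTail] at ht
    by_cases h : c = '['
    · simp [h] at ht
    · simp only [List.mem_cons, not_or]
      exact ⟨fun hc => h hc.symm, ih (by simpa [h] using ht)⟩

theorem pvInside_decomp : ∀ (l : List Char), pvInside l = true →
    ∃ mid post, l = mid ++ ']' :: post ∧ ']' ∉ mid ∧ pvOk post = true := by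
  intro l
  induction l with
  | nil => intro h; simp [pvInside] at h
  | cons c rest ih =>
    intro h
    rw [pvInside] at h
    by_cases hc : c = ']'
    · exact ⟨[], rest, by simp [hc], by simp, by simpa [hc] using h⟩
    · obtain ⟨mid, post, hrest, hm, hp⟩ := ih (by simpa [hc] using h)
      exact ⟨c :: mid, post, by simp [hrest], by simp [hm, Ne.symm hc], hp⟩

theorem pvDecomp : ∀ (p : List Char), pvOk p = true → '[' ∈ p →
    ∃ pre mid post, p = pre ++ '[' :: (mid ++ ']' :: post) ∧
      '[' ∉ pre ∧ ']' ∉ pre ∧ ']' ∉ mid ∧ pvOk post = true := by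
  intro p
  induction p with
  | nil => simp
  | cons c rest ih =>
    intro hok hmem
    rw [pvOk] at hok
    by_cases h1 : c = '['
    · obtain ⟨mid, post, hrest, hm, hp⟩ := pvInside_decomp rest (by simpa [h1] using hok)
      exact ⟨[], mid, post, by simp [h1, hrest], by simp, by simp, hm, hp⟩
    · by_cases h2 : c = ']'
      · exfalso
        have := pvTail_no_open rest (by simpa [h1, h2] using hok)
        rcases List.mem_cons.mp hmem with hc | hc
        · exact h1 hc.symm
        · exact this hc
      · have hmem' : '[' ∈ rest := by
          rcases List.mem_cons.mp hmem with hc | hc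
          · exact absurd hc.symm h1
          · exact hc
        obtain ⟨pre, mid, post, hrest, hp1, hp2, hm, hp⟩ :=
          ih (by simpa [h1, h2] using hok) hmem'
        exact ⟨c :: pre, mid, post, by simp [hrest], by simp [hp1, Ne.symm h1],
               by simp [hp2, Ne.symm h2], hm, hp⟩

theorem pvTake_len (a b : List Char) : (a ++ b).take a.length = a := by simp

theorem pvDrop_len1 (a : List Char) (c : Char) (b : List Char) :
    (a ++ c :: b).drop (a.length + 1) = b := by
  induction a with
  | nil => rfl
  | cons x xs ih => simp [ih]

theorem pvMain : ∀ (fuel : Nat) (p : List Char), pvOk p = true →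
    p.count '[' < fuel → pvCleanA fuel p = pvScan false p := by
  intro fuel
  induction fuel with
  | zero => intro p _ hc; omega
  | succ fuel ih =>
    intro p hok hc
    by_cases hb : '[' ∈ p
    · obtain ⟨pre, mid, post, hp, hpre1, hpre2, hmid, hpost⟩ := pvDecomp p hok hb
      have hfindL : PySem.Chars.find p ['['] = (pre.length : Int) := by
        rw [hp]; exact pvFind_char pre _ '[' hpre1
      have hp' : p = (pre ++ '[' :: mid) ++ ']' :: post := by simp [hp]
      have hfindR : PySem.Chars.find p [']'] = ((pre ++ '[' :: mid).length : Int) := by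
        rw [hp']
        exact pvFind_char (pre ++ '[' :: mid) _ ']' (by simp [hpre2, hmid])
      rw [pvCleanA, if_pos (show PySem.Chars.find p ['['] > -1 by rw [hfindL]; omega)]
      simp only [hfindL, hfindR, PySem.Chars.slice_eq_listSlice]
      rw [show ((pre ++ '[' :: mid).length : Int) + 1
            = (((pre ++ '[' :: mid).length + 1 : Nat) : Int) by push_cast; ring]
      rw [PySem.List.slice_to_natCast, PySem.List.slice_from_natCast]
      have htake : p.take pre.length = pre := by
        rw [hp]; exact pvTake_len pre _
      have hdrop : p.drop ((pre ++ '[' :: mid).length + 1) = post := by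
        rw [hp']; exact pvDrop_len1 (pre ++ '[' :: mid) ']' post
      rw [htake, hdrop]
      have hokpp : pvOk (pre ++ post) = true := by
        rw [pvOk_append pre post hpre1 hpre2]; exact hpost
      have hcount : (pre ++ post).count '[' < fuel := by
        have h0 : pre.count '[' = 0 := List.count_eq_zero.mpr hpre1
        have hstep : post.count '[' + 1 ≤ p.count '[' := by
          rw [hp]; simp [List.count_append]; omega
        simp only [List.count_append]
        omega
      rw [ih _ hokpp hcount, pvScan_false_append pre post hpre1]
      rw [hp, pvScan_false_append pre _ hpre1]
      have : pvScan false ('[' :: (mid ++ ']' :: post)) = pvScan false post := by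
        show (if ('[' : Char) = '[' then pvScan true (mid ++ ']' :: post)
              else '[' :: pvScan false (mid ++ ']' :: post)) = pvScan false post
        rw [if_pos rfl, pvScan_true_append mid _ hmid]
        simp [pvScan]
      rw [this]
    · rw [pvCleanA, if_neg, pvScan_no_bracket p hb]
      rw [(PySem.Chars.find_eq_neg_one_iff _ _).mpr (fun hinf => hb (pvInfix_singleton.mp hinf))]
      omega

-- ===== VERDICT (by name: the statement is the Claim_ definition above) =====
theorem removeModifications_spec : Claim_equal_removeModifications := by
  intro peptides _ hpre
  unfold Spec_removeModifications removeModifications removeModifications_alt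
  rw [PySem.List.foldl_append_singleton_eq_map, PySem.List.foldl_append_singleton_eq_map]
  simp only [List.nil_append]
  apply List.map_congr_left
  intro s hs
  have hok := hpre s hs
  rw [pvFoldB, pvMain (s.toList.length + 1) s.toList hok
        (by have := List.count_le_length (l := s.toList) (a := '['); omega)]
  simp
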